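-- pv_equiv track=rewrite | github.com/rasmi/adventofcode | 2022/advent08.py | check_scenery
-- ===== SOURCE A (Python) =====
-- def check_scenery(row):
--     """Compute how many trees are visible from each tree from the left/start."""
--     scenery_scores = []
--     for (index, number) in enumerate(row):
--         score = 0
--         for adjacent_number in row[min(index+1, len(row)):len(row)]:
--             if number > adjacent_number:
--                 score += 1
--             else:
--                 # We count the end tree in the scenery score.
--                 score += 1
--                 break
--         scenery_scores.append(score)
--
--     return scenery_scores
-- ===== SOURCE B (Python) =====
-- def check_scenery(row):
--     """Compute how many trees are visible from each tree from the left/start."""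
--     scores = []
--     stack = []  # pairs (value, position measured from the right end), one pass, O(n)
--     for k, x in enumerate(reversed(row)):
--         while stack and stack[-1][0] < x:
--             stack.pop()
--         scores.append(k - stack[-1][1] if stack else k)
--         stack.append((x, k))
--     scores.reverse()
--     return scores
-- ===== Notes on version B (the rewrite author's own statement) =====
-- stated objective: faster
-- what changed: Replaced the per-index rightward rescan with a single right-to-left pass maintaining a monotonic stack of (value, position-from-right) pairs, so each element is pushed and popped at most once.
import Mathlib
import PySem

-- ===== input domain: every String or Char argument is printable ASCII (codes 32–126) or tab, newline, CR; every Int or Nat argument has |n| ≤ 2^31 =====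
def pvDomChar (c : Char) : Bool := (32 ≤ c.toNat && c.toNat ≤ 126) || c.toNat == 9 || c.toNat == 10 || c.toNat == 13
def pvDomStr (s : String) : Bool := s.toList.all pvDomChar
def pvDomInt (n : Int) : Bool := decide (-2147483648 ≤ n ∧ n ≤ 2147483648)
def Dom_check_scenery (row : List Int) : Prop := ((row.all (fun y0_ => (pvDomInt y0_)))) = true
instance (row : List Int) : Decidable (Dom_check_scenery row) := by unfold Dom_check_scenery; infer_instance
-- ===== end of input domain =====

-- B replaces A's per-index rightward rescan by one right-to-left pass with a monotonic stack (asymptotically faster).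

-- ===== PORT A =====
-- inner 'for adjacent_number in …' loop with its break
def aInner (x : Int) (score : Int) : List Int → Int
  | [] => score
  | y :: ys => if x > y then aInner x (score + 1) ys else score + 1

def check_scenery (row : List Int) : List Int :=
  (PySem.List.enumerate row).foldl
    (fun acc p =>
      acc ++ [aInner p.2 0
        (PySem.List.slice row (some (min (p.1 + 1) (row.length : Int))) (some (row.length : Int)))])
    []

-- ===== PORT B =====
-- 'while stack and stack[-1][0] < x: stack.pop()'  (stack top = list head)
def popWhile (x : Int) : List (Int × Int) → List (Int × Int)
  | [] => []
  | (v, k) :: rest => if v < x then popWhile x rest else (v, k) :: rest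

-- one iteration of the 'for k, x in enumerate(reversed(row))' loop; state = (stack, scores)
def bstep (st : List (Int × Int) × List Int) (p : Int × Int) : List (Int × Int) × List Int :=
  let stack := popWhile p.2 st.1
  let score : Int := match stack with
    | [] => p.1
    | (_, k) :: _ => p.1 - k
  ((p.2, p.1) :: stack, st.2 ++ [score])

def check_scenery_alt (row : List Int) : List Int :=
  ((PySem.List.enumerate row.reverse).foldl bstep ([], [])).2.reverse

-- ===== PRECONDITION & SPEC =====
def Spec_check_scenery (row : List Int) (out : List Int) : Prop := out = check_scenery_alt row
instance (row : List Int) (out : List Int) : Decidable (Spec_check_scenery row out) := by unfold Spec_check_scenery; infer_instance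

-- ===== CLAIM (what is proved, stated in full; the proofs are below) =====
def Claim_equal_check_scenery : Prop := ∀ (row : List Int), Dom_check_scenery row → Spec_check_scenery row (check_scenery row)

-- ===== LEMMAS AND PROOFS =====

-- common reference specification: the viewing distance of x into the list to its right
def aScore (x : Int) : List Int → Int
  | [] => 0
  | y :: ys => if x > y then 1 + aScore x ys else 1

def spec : List Int → List Int
  | [] => []
  | x :: xs => aScore x xs :: spec xs

-- the stack B holds after having processed xs (positions counted from the right end)
def stackSpec : List Int → List (Int × Int)
  | [] => []
  | x :: xs => (x, (xs.length : Int)) :: popWhile x (stackSpec xs)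

theorem aInner_eq (x : Int) (l : List Int) : ∀ s : Int, aInner x s l = s + aScore x l := by
  induction l with
  | nil => intro s; simp [aInner, aScore]
  | cons y ys ih =>
      intro s
      by_cases h : y < x
      · simp only [aInner, aScore, if_pos h, ih]; ring
      · simp only [aInner, aScore, if_neg h]

theorem mapA (l : List Int) : ∀ (row : List Int) (s : Int), 0 ≤ s → row.drop s.toNat = l →
    (PySem.List.enumerate l s).map
      (fun p => aInner p.2 0
        (PySem.List.slice row (some (min (p.1 + 1) (row.length : Int))) (some (row.length : Int))))
      = spec l := by
  induction l with
  | nil => intro row s _ _; simp [PySem.List.enumerate_nil, spec]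
  | cons x xs ih =>
      intro row s hs hdrop
      have hlt : s.toNat < row.length := by
        by_contra h
        rw [List.drop_eq_nil_of_le (by omega)] at hdrop
        exact (List.cons_ne_nil x xs) hdrop.symm
      have hdrop1 : row.drop (s.toNat + 1) = xs := by
        rw [← List.drop_drop, hdrop]
        simp
      have hmin : min (s + 1) (row.length : Int) = s + 1 := by omega
      have hslice : PySem.List.slice row (some (s + 1)) (some (row.length : Int)) = xs := by
        rw [PySem.List.slice_toNat row (by omega) (by omega)]
        have h1 : (s + 1).toNat = s.toNat + 1 := by omega
        rw [h1, hdrop1]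
        simp only [Int.toNat_natCast]
        apply List.take_of_length_le
        have hlen2 := congrArg List.length hdrop
        simp only [List.length_drop, List.length_cons] at hlen2
        omega
      rw [PySem.List.enumerate_cons, List.map_cons, spec]
      congr 1
      · simp only [hmin, hslice, aInner_eq, zero_add]
      · apply ih row (s + 1) (by omega)
        have h1 : (s + 1).toNat = s.toNat + 1 := by omega
        rw [h1, hdrop1]

theorem A_eq (row : List Int) : check_scenery row = spec row := by
  unfold check_scenery
  rw [PySem.List.foldl_append_singleton_eq_map, List.nil_append]
  exact mapA row row 0 le_rfl (by simp)

theorem popWhile_popWhile (x y : Int) (h : y < x) :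
    ∀ s : List (Int × Int), popWhile x (popWhile y s) = popWhile x s := by
  intro s
  induction s with
  | nil => rfl
  | cons p rest ih =>
      obtain ⟨v, k⟩ := p
      by_cases hv : v < y
      · rw [popWhile, if_pos hv, ih, popWhile, if_pos (by omega)]
      · rw [popWhile, if_neg hv]

theorem score_eq (x : Int) (xs : List Int) :
    (match popWhile x (stackSpec xs) with
      | [] => (xs.length : Int)
      | (_, k) :: _ => (xs.length : Int) - k) = aScore x xs := by
  induction xs with
  | nil => simp [stackSpec, popWhile, aScore]
  | cons y ys ih =>
      by_cases h : y < x
      · rw [stackSpec, popWhile, if_pos h, popWhile_popWhile x y h, aScore, if_pos h]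
        rcases hpop : popWhile x (stackSpec ys) with _ | ⟨⟨v, k⟩, rest⟩ <;>
          rw [hpop] at ih <;> simp only at ih ⊢ <;> rw [← ih] <;>
          simp only [List.length_cons] <;> push_cast <;> ring
      · rw [stackSpec, popWhile, if_neg h, aScore, if_neg h]
        simp

theorem bstep_eq (st : List (Int × Int)) (sc : List Int) (k x : Int) :
    bstep (st, sc) (k, x) =
      ((x, k) :: popWhile x st,
       sc ++ [match popWhile x st with | [] => k | (_, q) :: _ => k - q]) := rfl

theorem fold_eq (l : List Int) :
    (PySem.List.enumerate l.reverse).foldl bstep ([], []) = (stackSpec l, (spec l).reverse) := by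
  induction l with
  | nil => simp [PySem.List.enumerate_nil, stackSpec, spec]
  | cons x xs ih =>
      have hrev : (x :: xs).reverse = xs.reverse ++ [x] := by simp
      rw [hrev, PySem.List.enumerate_append, List.foldl_append, ih]
      have hlen : ((0 : Int) + xs.reverse.length) = (xs.length : Int) := by simp
      rw [hlen, PySem.List.enumerate_cons, PySem.List.enumerate_nil,
        List.foldl_cons, List.foldl_nil, bstep_eq, score_eq x xs, stackSpec, spec,
        List.reverse_cons]

theorem B_eq (row : List Int) : check_scenery_alt row = spec row := by
  unfold check_scenery_alt
  rw [fold_eq, List.reverse_reverse]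

-- ===== VERDICT (by name: the statement is the Claim_ definition above) =====
theorem check_scenery_spec : Claim_equal_check_scenery := by
  intro row _
  unfold Spec_check_scenery
  rw [A_eq, B_eq]
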